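-- pv_equiv track=rewrite | github.com/cmeraki/data-mining | run_script.py | combine_timestamps
-- ===== SOURCE A (Python) =====
-- def combine_timestamps(timestamps):
--     combined_timestamps = []
--     i = 0
--     while i < len(timestamps) - 6:
--         combined_timestamps.append((timestamps[i][0], timestamps[i + 6][1]))
--         i += 7
--     while i < len(timestamps):
--         combined_timestamps.append(timestamps[i])
--         i += 1
--     return combined_timestamps
-- ===== SOURCE B (Python) =====
-- def combine_timestamps(timestamps):
--     if len(timestamps) < 7:
--         return list(timestamps)
--     return [(timestamps[0][0], timestamps[6][1])] + combine_timestamps(timestamps[7:])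
-- ===== Notes on version B (the rewrite author's own statement) =====
-- stated objective: simpler
-- what changed: Replaced A's two manual index-stepping while loops over one index with a direct recursion on the list: combine the first seven elements into one pair and recurse on the tail slice, returning a short list unchanged.
import Mathlib
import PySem

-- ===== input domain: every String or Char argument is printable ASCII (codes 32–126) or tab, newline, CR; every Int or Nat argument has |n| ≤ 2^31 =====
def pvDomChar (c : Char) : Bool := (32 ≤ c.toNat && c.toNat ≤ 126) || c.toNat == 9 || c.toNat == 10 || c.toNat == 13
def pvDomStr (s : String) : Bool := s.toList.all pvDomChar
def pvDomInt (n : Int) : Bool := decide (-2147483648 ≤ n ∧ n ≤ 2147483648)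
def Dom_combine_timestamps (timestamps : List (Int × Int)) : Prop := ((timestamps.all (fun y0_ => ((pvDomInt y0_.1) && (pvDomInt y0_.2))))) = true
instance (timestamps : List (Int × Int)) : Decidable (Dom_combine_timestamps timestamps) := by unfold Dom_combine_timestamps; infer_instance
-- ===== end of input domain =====

-- B replaces A's two index-stepping while loops with a direct recursion on the list
-- (combine the first seven, recurse on the tail slice); objective: simpler. Return values only.

-- ===== PORT A =====
-- second while loop: append remaining elements one by one
def pvA_loop2 (ts : List (Int × Int)) (i : Nat) (acc : List (Int × Int)) : List (Int × Int) :=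
  if i < ts.length then
    pvA_loop2 ts (i + 1) (acc ++ [PySem.List.pyGetD ts (i : Int) (0, 0)])
  else acc
termination_by ts.length - i

-- first while loop: combine full groups of seven, stepping the index by 7
def pvA_loop1 (ts : List (Int × Int)) (i : Nat) (acc : List (Int × Int)) : List (Int × Int) :=
  if (i : Int) < (ts.length : Int) - 6 then
    pvA_loop1 ts (i + 7)
      (acc ++ [((PySem.List.pyGetD ts (i : Int) (0, 0)).1,
                (PySem.List.pyGetD ts ((i : Int) + 6) (0, 0)).2)])
  else pvA_loop2 ts i acc
termination_by ts.length - i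
decreasing_by omega

def combine_timestamps (timestamps : List (Int × Int)) : List (Int × Int) :=
  pvA_loop1 timestamps 0 []

-- ===== PORT B =====
def combine_timestamps_alt (timestamps : List (Int × Int)) : List (Int × Int) :=
  if timestamps.length < 7 then timestamps
  else [((PySem.List.pyGetD timestamps 0 (0, 0)).1,
         (PySem.List.pyGetD timestamps 6 (0, 0)).2)]
       ++ combine_timestamps_alt (PySem.List.slice timestamps (some 7) none)
termination_by timestamps.length
decreasing_by
  rw [PySem.List.slice_from _ (by norm_num)]
  simp; omega

-- ===== PRECONDITION & SPEC =====
def Spec_combine_timestamps (timestamps : List (Int × Int)) (out : List (Int × Int)) : Prop := out = combine_timestamps_alt timestamps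
instance (timestamps : List (Int × Int)) (out : List (Int × Int)) : Decidable (Spec_combine_timestamps timestamps out) := by unfold Spec_combine_timestamps; infer_instance

-- ===== CLAIM (what is proved, stated in full; the proofs are below) =====
def Claim_equal_combine_timestamps : Prop := ∀ (timestamps : List (Int × Int)), Dom_combine_timestamps timestamps → Spec_combine_timestamps timestamps (combine_timestamps timestamps)

-- ===== LEMMAS AND PROOFS =====
theorem pvA_loop2_eq (ts : List (Int × Int)) (i : Nat) (acc : List (Int × Int)) :
    pvA_loop2 ts i acc = acc ++ ts.drop i := by
  by_cases h : i < ts.length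
  · rw [pvA_loop2, if_pos h, pvA_loop2_eq ts (i + 1),
      PySem.List.pyGetD_eq_getElem ts (0, 0) (by omega) (by exact_mod_cast h),
      List.drop_eq_getElem_cons h]
    simp
  · rw [pvA_loop2, if_neg h, List.drop_eq_nil_of_le (by omega), List.append_nil]
termination_by ts.length - i

theorem pvA_loop1_eq (ts : List (Int × Int)) (i : Nat) (acc : List (Int × Int)) :
    pvA_loop1 ts i acc = acc ++ combine_timestamps_alt (ts.drop i) := by
  by_cases h : (i : Int) < (ts.length : Int) - 6
  · have hi6 : i + 6 < ts.length := by omega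
    have hi0 : i < ts.length := by omega
    have hlen : ¬ ((ts.drop i).length < 7) := by
      rw [List.length_drop]; omega
    rw [pvA_loop1, if_pos h, pvA_loop1_eq ts (i + 7)]
    conv_rhs => rw [combine_timestamps_alt, if_neg hlen]
    rw [PySem.List.slice_from _ (by norm_num)]
    rw [PySem.List.pyGetD_eq_getElem ts (0, 0) (by omega) (by exact_mod_cast hi0)]
    rw [show ((i : Int) + 6) = (((i + 6 : Nat) : Int)) by push_cast; ring]
    rw [PySem.List.pyGetD_eq_getElem ts (0, 0) (by omega) (by exact_mod_cast hi6)]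
    rw [PySem.List.pyGetD_eq_getElem (ts.drop i) (0, 0) (by omega)
      (by rw [List.length_drop]; exact_mod_cast (by omega : (0:Nat) < ts.length - i))]
    rw [PySem.List.pyGetD_eq_getElem (ts.drop i) (0, 0) (by omega)
      (by rw [List.length_drop]; exact_mod_cast (by omega : (6:Nat) < ts.length - i))]
    simp [List.getElem_drop, List.drop_drop, show ((i:Int)+6).toNat = i+6 by omega]
  · rw [pvA_loop1, if_neg h, pvA_loop2_eq]
    have hlen : (ts.drop i).length < 7 := by rw [List.length_drop]; omega
    rw [combine_timestamps_alt, if_pos hlen]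
termination_by ts.length - i

-- ===== VERDICT (by name: the statement is the Claim_ definition above) =====
theorem combine_timestamps_spec : Claim_equal_combine_timestamps := by
  intro ts _
  unfold Spec_combine_timestamps combine_timestamps
  simpa using pvA_loop1_eq ts 0 []
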